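-- pv_equiv track=rewrite | github.com/danigfavero/geometria-computacional | vjudge/art_gallery.py | contains_critical_point
-- ===== SOURCE A (Python) =====
-- def contains_critical_point(gallery, n):
--     if (n < 4):
--         return False
--
--     sign = True
--     for i in range(n):
--         j = (i + 1) % n
--         k = (i + 2) % n
--         dx1 = gallery[k][0] - gallery[j][0]
--         dy1 = gallery[k][1] - gallery[j][1]
--         dx2 = gallery[i][0] - gallery[j][0]
--         dy2 = gallery[i][1] - gallery[j][1]
--         zcrossproduct = dx1 * dy2 - dy1 * dx2
--
--         if i == 0:
--             sign = zcrossproduct > 0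
--         elif sign != (zcrossproduct > 0):
--             return True
--     return False
-- ===== SOURCE B (Python) =====
-- def contains_critical_point(gallery, n):
--     if n < 4:
--         return False
--     signs = [
--         (gallery[(i + 2) % n][0] - gallery[(i + 1) % n][0]) * (gallery[i][1] - gallery[(i + 1) % n][1])
--         - (gallery[(i + 2) % n][1] - gallery[(i + 1) % n][1]) * (gallery[i][0] - gallery[(i + 1) % n][0]) > 0
--         for i in range(n)
--     ]
--     return any(a != b for a in signs for b in signs)
-- ===== Notes on version B (the rewrite author's own statement) =====
-- stated objective: alternative
-- what changed: Materializes all n orientation booleans first, then decides convexity by a quadratic all-pairs disagreement test any(a != b), replacing A's streaming single pass that fixes the first sign as reference and early-exits on the first mismatch.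
-- outside the precondition, e.g. on contains_critical_point([(-2, -3), (2, 0), (-2, 0), (1, 1)], 5): A returns True, B raises IndexError
import Mathlib
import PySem

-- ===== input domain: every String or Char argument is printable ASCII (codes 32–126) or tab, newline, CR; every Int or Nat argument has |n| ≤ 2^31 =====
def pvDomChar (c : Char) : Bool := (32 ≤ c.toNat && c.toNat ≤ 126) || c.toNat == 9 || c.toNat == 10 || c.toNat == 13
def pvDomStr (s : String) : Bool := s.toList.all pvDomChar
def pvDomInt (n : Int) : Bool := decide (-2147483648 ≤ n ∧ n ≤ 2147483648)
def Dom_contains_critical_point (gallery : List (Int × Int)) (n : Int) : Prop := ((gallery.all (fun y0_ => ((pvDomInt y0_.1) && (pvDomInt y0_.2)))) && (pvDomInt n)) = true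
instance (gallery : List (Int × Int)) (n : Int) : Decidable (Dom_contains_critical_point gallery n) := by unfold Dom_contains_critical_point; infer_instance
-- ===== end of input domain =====

-- B materializes all n orientation booleans and decides by a quadratic all-pairs
-- disagreement test, instead of A's streaming reference-sign scan with early exit
-- (objective: alternative; B is quadratic where A is linear).

-- ===== PORT A =====
-- A's per-iteration cross product (dx1*dy2 - dy1*dx2), with Python indexing gallery[...]
def pvCrossA (gallery : List (Int × Int)) (n i : Int) : Int :=
  let j := PySem.Int.mod (i + 1) n
  let k := PySem.Int.mod (i + 2) n
  let dx1 := (PySem.List.pyGetD gallery k (0, 0)).1 - (PySem.List.pyGetD gallery j (0, 0)).1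
  let dy1 := (PySem.List.pyGetD gallery k (0, 0)).2 - (PySem.List.pyGetD gallery j (0, 0)).2
  let dx2 := (PySem.List.pyGetD gallery i (0, 0)).1 - (PySem.List.pyGetD gallery j (0, 0)).1
  let dy2 := (PySem.List.pyGetD gallery i (0, 0)).2 - (PySem.List.pyGetD gallery j (0, 0)).2
  dx1 * dy2 - dy1 * dx2

-- A's for-loop over range(n) with the 'sign' state and early return True
def pvLoopA (gallery : List (Int × Int)) (n : Int) : List Int → Bool → Bool
  | [], _ => false
  | i :: rest, sign =>
    let z := pvCrossA gallery n i
    if i = 0 then pvLoopA gallery n rest (decide (z > 0))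
    else if sign ≠ decide (z > 0) then true
    else pvLoopA gallery n rest sign

def contains_critical_point (gallery : List (Int × Int)) (n : Int) : Bool :=
  if n < 4 then false
  else pvLoopA gallery n (PySem.List.pyRange 0 n 1) true

-- ===== PORT B =====
-- B's orientation boolean from the list comprehension (literally Source B's expression)
def pvSignB (gallery : List (Int × Int)) (n i : Int) : Bool :=
  decide
    (((PySem.List.pyGetD gallery (PySem.Int.mod (i + 2) n) (0, 0)).1
        - (PySem.List.pyGetD gallery (PySem.Int.mod (i + 1) n) (0, 0)).1)
       * ((PySem.List.pyGetD gallery i (0, 0)).2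
        - (PySem.List.pyGetD gallery (PySem.Int.mod (i + 1) n) (0, 0)).2)
     - ((PySem.List.pyGetD gallery (PySem.Int.mod (i + 2) n) (0, 0)).2
        - (PySem.List.pyGetD gallery (PySem.Int.mod (i + 1) n) (0, 0)).2)
       * ((PySem.List.pyGetD gallery i (0, 0)).1
        - (PySem.List.pyGetD gallery (PySem.Int.mod (i + 1) n) (0, 0)).1) > 0)

def contains_critical_point_alt (gallery : List (Int × Int)) (n : Int) : Bool :=
  if n < 4 then false
  else
    let signs := (PySem.List.pyRange 0 n 1).map (pvSignB gallery n)
    signs.any (fun a => signs.any (fun b => a != b))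

-- ===== PRECONDITION & SPEC =====
-- Pre_ excludes n ≥ 4 with n > len(gallery): there A raises IndexError unless a sign flip
-- happens first (an accident of the early exit: it may return True on such inputs), and B
-- (which materializes all n orientation booleans) raises IndexError on all of them.
def Pre_contains_critical_point (gallery : List (Int × Int)) (n : Int) : Prop :=
  n < 4 ∨ n ≤ gallery.length
instance (gallery : List (Int × Int)) (n : Int) : Decidable (Pre_contains_critical_point gallery n) := by unfold Pre_contains_critical_point; infer_instance

def pvWitness_contains_critical_point : (List (Int × Int)) × Int :=
  ([(0, 0), (2, 0), (1, 1), (2, 2), (0, 2)], 5)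

def Spec_contains_critical_point (gallery : List (Int × Int)) (n : Int) (out : Bool) : Prop := out = contains_critical_point_alt gallery n
instance (gallery : List (Int × Int)) (n : Int) (out : Bool) : Decidable (Spec_contains_critical_point gallery n out) := by unfold Spec_contains_critical_point; infer_instance

-- ===== CLAIM (what is proved, stated in full; the proofs are below) =====
def Claim_equal_contains_critical_point : Prop := ∀ (gallery : List (Int × Int)) (n : Int), Dom_contains_critical_point gallery n → Pre_contains_critical_point gallery n → Spec_contains_critical_point gallery n (contains_critical_point gallery n)

-- ===== LEMMAS AND PROOFS =====

theorem pvSignB_eq (gallery : List (Int × Int)) (n i : Int) :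
    pvSignB gallery n i = decide (0 < pvCrossA gallery n i) := rfl

-- The tail of A's loop (indices ≠ 0) is an 'any sign differs' scan
theorem pvLoopA_any (gallery : List (Int × Int)) (n : Int) :
    ∀ (is : List Int) (sign : Bool), (∀ i ∈ is, i ≠ 0) →
      pvLoopA gallery n is sign
        = is.any (fun i => decide (0 < pvCrossA gallery n i) != sign) := by
  intro is
  induction is with
  | nil => intro sign _; rfl
  | cons i rest ih =>
    intro sign h
    have hi : i ≠ 0 := h i (by simp)
    have hr : ∀ j ∈ rest, j ≠ 0 := fun j hj => h j (by simp [hj])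
    simp only [pvLoopA, if_neg hi, List.any_cons]
    by_cases hs : sign = decide (0 < pvCrossA gallery n i)
    · rw [if_neg (by simp [hs]), ih sign hr, ← hs]
      simp
    · rw [if_pos (by simpa using hs)]
      have : (decide (0 < pvCrossA gallery n i) != sign) = true := by
        simp [bne_iff_ne]; exact fun e => hs e.symm
      simp [this]

-- A list of booleans has a disagreeing pair iff some element differs from the head
theorem pvPairAny (x : Bool) (t : List Bool) :
    ((x :: t).any (fun a => (x :: t).any (fun b => a != b)))
      = t.any (fun b => b != x) := by
  cases h : t.any (fun b => b != x)
  · have hall : ∀ b ∈ t, b = x := by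
      intro b hb
      have := List.any_eq_false.1 h b hb
      simpa [bne_iff_ne] using this
    simp only [List.any_eq_false]
    intro a ha hcon
    obtain ⟨b, hb, hne⟩ := List.any_eq_true.1 hcon
    have ha' : a = x := (List.mem_cons.1 ha).elim id (hall a)
    have hb' : b = x := (List.mem_cons.1 hb).elim id (hall b)
    rw [ha', hb'] at hne
    simp at hne
  · obtain ⟨b, hb, hne⟩ := List.any_eq_true.1 h
    apply List.any_eq_true.2
    refine ⟨x, List.mem_cons_self, List.any_eq_true.2 ⟨b, List.mem_cons_of_mem _ hb, ?_⟩⟩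
    have : b ≠ x := bne_iff_ne.1 hne
    simp [bne_iff_ne]
    exact fun e => this e.symm

theorem contains_critical_point_spec : Claim_equal_contains_critical_point := by
  intro gallery n _ pre
  unfold Spec_contains_critical_point contains_critical_point contains_critical_point_alt
  by_cases hn : n < 4
  · simp [hn]
  · simp only [if_neg hn]
    set cb : Int → Bool := fun i => decide (0 < pvCrossA gallery n i) with hcb
    have hsplit : PySem.List.pyRange 0 n 1 = 0 :: PySem.List.pyRange 1 n 1 :=
      PySem.List.pyRange_one_cons (by omega)
    -- A side: peel off i = 0, then pvLoopA_any on the tail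
    have hA : pvLoopA gallery n (PySem.List.pyRange 0 n 1) true
        = (PySem.List.pyRange 1 n 1).any (fun i => cb i != cb 0) := by
      rw [hsplit]
      show pvLoopA gallery n (0 :: PySem.List.pyRange 1 n 1) true = _
      rw [show pvLoopA gallery n (0 :: PySem.List.pyRange 1 n 1) true
            = pvLoopA gallery n (PySem.List.pyRange 1 n 1)
                (decide (0 < pvCrossA gallery n 0)) from by simp [pvLoopA]]
      exact pvLoopA_any gallery n _ _
        (fun i hi => by have := PySem.List.mem_pyRange_one.1 hi; omega)
    rw [hA]
    -- B side: signs = cb 0 :: map over the tail; all-pairs reduces to compare-with-head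
    have hmap : (PySem.List.pyRange 0 n 1).map (pvSignB gallery n)
        = cb 0 :: (PySem.List.pyRange 1 n 1).map cb := by
      rw [hsplit]
      simp [pvSignB_eq, hcb]
    rw [hmap, pvPairAny, List.any_map]
    rfl
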